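-- pv_equiv track=rewrite | github.com/charvey/advent-of-code | 2015/11/solve.py | HasNonOverlappingPairs
-- ===== SOURCE A (Python) =====
-- def HasNonOverlappingPairs(chars):
--     i = 0
--     pairsFound = 0
--     while i < len(chars)-1:
--         if chars[i] == chars[i+1]:
--             pairsFound += 1
--             i += 2
--         else:
--             i += 1
--
--     return pairsFound >= 2
-- ===== SOURCE B (Python) =====
-- def HasNonOverlappingPairs(chars):
--     # Two-pass: collect all adjacent-equal positions, then greedily pick
--     # non-overlapping ones (at least 2 apart) and count them.
--     idxs = [i for i in range(len(chars) - 1) if chars[i] == chars[i + 1]]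
--     count = 0
--     last = -2
--     for i in idxs:
--         if i >= last + 2:
--             count += 1
--             last = i
--     return count >= 2
-- ===== Notes on version B (the rewrite author's own statement) =====
-- stated objective: alternative
-- what changed: Replaces A's single index-jumping while loop (skip 2 on a match) with a two-pass scheme: first build the list of all adjacent-equal positions, then a greedy selection pass over that list picks positions at least 2 apart and counts them.
import Mathlib
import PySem

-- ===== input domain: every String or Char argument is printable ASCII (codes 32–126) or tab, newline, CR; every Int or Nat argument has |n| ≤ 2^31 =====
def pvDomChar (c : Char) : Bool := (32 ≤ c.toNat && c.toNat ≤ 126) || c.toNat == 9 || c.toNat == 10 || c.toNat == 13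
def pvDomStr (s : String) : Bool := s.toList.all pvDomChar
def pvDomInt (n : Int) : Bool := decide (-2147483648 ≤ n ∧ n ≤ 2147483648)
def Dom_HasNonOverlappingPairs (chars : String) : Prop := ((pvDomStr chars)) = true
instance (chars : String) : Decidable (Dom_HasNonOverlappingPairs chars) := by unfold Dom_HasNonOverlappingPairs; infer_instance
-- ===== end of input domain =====

-- B replaces A's index-jumping while loop with a two-pass scheme (collect adjacent-equal
-- positions, then greedily select non-overlapping ones); alternative decomposition, same cost.

-- ===== PORT A =====
-- A's while loop: i scans, on a match counts and jumps by 2, else by 1.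
def pvLoopA (l : List Char) (i : Nat) (pairsFound : Nat) : Nat :=
  if h : i + 1 < l.length then
    if l.getD i ' ' = l.getD (i + 1) ' ' then pvLoopA l (i + 2) (pairsFound + 1)
    else pvLoopA l (i + 1) pairsFound
  else pairsFound
termination_by l.length - i
decreasing_by all_goals omega

def HasNonOverlappingPairs (chars : String) : Bool :=
  decide (pvLoopA chars.toList 0 0 ≥ 2)

-- ===== PORT B =====
-- pass 1: all positions with chars[i] == chars[i+1]
def pvIdxs (l : List Char) : List Nat :=
  (List.range (l.length - 1)).filter (fun j => decide (l.getD j ' ' = l.getD (j + 1) ' '))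

-- pass 2: greedy selection of positions at least 2 apart
def pvGreedy (idxs : List Nat) (count : Nat) (last : Int) : Nat :=
  match idxs with
  | [] => count
  | j :: rest =>
    if (j : Int) ≥ last + 2 then pvGreedy rest (count + 1) (j : Int)
    else pvGreedy rest count last

def HasNonOverlappingPairs_alt (chars : String) : Bool :=
  decide (pvGreedy (pvIdxs chars.toList) 0 (-2) ≥ 2)

-- ===== PRECONDITION & SPEC =====
def Spec_HasNonOverlappingPairs (chars : String) (out : Bool) : Prop := out = HasNonOverlappingPairs_alt chars
instance (chars : String) (out : Bool) : Decidable (Spec_HasNonOverlappingPairs chars out) := by unfold Spec_HasNonOverlappingPairs; infer_instance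

-- ===== CLAIM (what is proved, stated in full; the proofs are below) =====
def Claim_equal_HasNonOverlappingPairs : Prop := ∀ (chars : String), Dom_HasNonOverlappingPairs chars → Spec_HasNonOverlappingPairs chars (HasNonOverlappingPairs chars)

-- ===== LEMMAS AND PROOFS =====

-- main invariant: the greedy pass over the pair positions ≥ m (with last at least 2 below m)
-- computes exactly what A's loop computes from index m.
theorem pvGreedy_range'_eq_loopA (l : List Char) :
    ∀ (n m c : Nat) (last : Int), l.length - 1 - m ≤ n → last + 2 ≤ (m : Int) →
    pvGreedy ((List.range' m (l.length - 1 - m)).filter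
        (fun j => decide (l.getD j ' ' = l.getD (j + 1) ' '))) c last
      = pvLoopA l m c := by
  intro n
  induction n with
  | zero =>
    intro m c last hn _
    have hk : l.length - 1 - m = 0 := Nat.le_zero.mp hn
    rw [hk]
    rw [pvLoopA]
    rw [dif_neg (by omega)]
    simp [pvGreedy]
  | succ n ih =>
    intro m c last hn hlast
    by_cases hm : m + 1 < l.length
    · have hk : l.length - 1 - m = (l.length - 1 - (m + 1)) + 1 := by omega
      rw [hk, List.range'_succ, List.filter_cons]
      rw [pvLoopA, dif_pos hm]
      by_cases hp : l.getD m ' ' = l.getD (m + 1) ' '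
      · simp only [hp, decide_true, if_true]
        rw [pvGreedy]
        rw [if_pos (by exact_mod_cast hlast)]
        -- need: greedy over positions ≥ m+1 with last = m equals greedy over positions ≥ m+2
        have hskip :
            pvGreedy ((List.range' (m + 1) (l.length - 1 - (m + 1))).filter
                (fun j => decide (l.getD j ' ' = l.getD (j + 1) ' '))) (c + 1) (m : Int)
              = pvGreedy ((List.range' (m + 2) (l.length - 1 - (m + 2))).filter
                (fun j => decide (l.getD j ' ' = l.getD (j + 1) ' '))) (c + 1) (m : Int) := by
          by_cases hk2 : l.length - 1 - (m + 1) = 0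
          · have hk3 : l.length - 1 - (m + 2) = 0 := by omega
            rw [hk2, hk3]
            rfl
          · have hk3 : l.length - 1 - (m + 1) = (l.length - 1 - (m + 2)) + 1 := by omega
            rw [hk3, List.range'_succ, List.filter_cons]
            by_cases hp2 : l.getD (m + 1) ' ' = l.getD (m + 2) ' '
            · simp only [hp2, decide_true, if_true]
              rw [pvGreedy]
              rw [if_neg (by push_cast; omega)]
            · simp only [hp2, decide_false, Bool.false_eq_true, if_false]
        rw [hskip]
        exact ih (m + 2) (c + 1) (m : Int) (by omega) (by push_cast; omega)
      · simp only [hp, decide_false, if_false]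
        exact ih (m + 1) c last (by omega) (by push_cast at hlast ⊢; omega)
    · have hk : l.length - 1 - m = 0 := by omega
      rw [hk]
      rw [pvLoopA, dif_neg hm]
      simp [pvGreedy]

theorem pvIdxs_eq_range' (l : List Char) :
    pvIdxs l = (List.range' 0 (l.length - 1)).filter
      (fun j => decide (l.getD j ' ' = l.getD (j + 1) ' ')) := by
  unfold pvIdxs
  rw [List.range_eq_range']

-- ===== VERDICT (by name: the statement is the Claim_ definition above) =====
theorem HasNonOverlappingPairs_spec : Claim_equal_HasNonOverlappingPairs := by
  intro chars _
  unfold Spec_HasNonOverlappingPairs HasNonOverlappingPairs HasNonOverlappingPairs_alt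
  rw [pvIdxs_eq_range']
  have h := pvGreedy_range'_eq_loopA chars.toList (chars.toList.length - 1) 0 0 (-2)
    (by omega) (by omega)
  simp only [Nat.sub_zero] at h
  rw [h]
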